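-- pv_equiv track=rewrite | github.com/Abhisheknishant/dpdk | buildtools/update_version_map_abi.py | store_functions
-- ===== SOURCE A (Python) =====
-- def is_function_line(ln):
--     return ln.startswith('\t') and ln.endswith(';\n') and ":" not in ln
--
-- def is_version_end_line(ln):
--     return ln.startswith('}') and ln.endswith(';\n') and ":" not in ln
--
-- def is_local_line(ln):
--     return ln.startswith('\tlocal: ') and ln.endswith(';\n')
--
-- def store_functions(f_in):
--     functions = []
--     local_line = []
--
--     for line in f_in:
--         if is_version_end_line(line): break
--         elif is_local_line(line):
--             local_line = [line]
--         elif is_function_line(line): functions += [line]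
--
--     return functions, local_line
-- ===== SOURCE B (Python) =====
-- def is_function_line(ln):
--     return ln.startswith('\t') and ln.endswith(';\n') and ":" not in ln
--
-- def is_version_end_line(ln):
--     return ln.startswith('}') and ln.endswith(';\n') and ":" not in ln
--
-- def is_local_line(ln):
--     return ln.startswith('\tlocal: ') and ln.endswith(';\n')
--
-- def _prefix_before_version_end(f_in):
--     out = []
--     for ln in f_in:
--         if is_version_end_line(ln):
--             break
--         out.append(ln)
--     return out
--
-- def store_functions(f_in):
--     prefix = _prefix_before_version_end(f_in)
--     functions = [ln for ln in prefix if is_function_line(ln)]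
--     locals_ = [ln for ln in prefix if is_local_line(ln)]
--     return functions, [locals_[-1]] if locals_ else []
-- ===== Notes on version B (the rewrite author's own statement) =====
-- stated objective: alternative
-- what changed: Replaces the single interleaved break-loop with a truncate-then-two-passes decomposition: first materialize the prefix before the version-end line, then filter function lines and local lines in two separate passes, keeping the last local line.
import Mathlib
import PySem

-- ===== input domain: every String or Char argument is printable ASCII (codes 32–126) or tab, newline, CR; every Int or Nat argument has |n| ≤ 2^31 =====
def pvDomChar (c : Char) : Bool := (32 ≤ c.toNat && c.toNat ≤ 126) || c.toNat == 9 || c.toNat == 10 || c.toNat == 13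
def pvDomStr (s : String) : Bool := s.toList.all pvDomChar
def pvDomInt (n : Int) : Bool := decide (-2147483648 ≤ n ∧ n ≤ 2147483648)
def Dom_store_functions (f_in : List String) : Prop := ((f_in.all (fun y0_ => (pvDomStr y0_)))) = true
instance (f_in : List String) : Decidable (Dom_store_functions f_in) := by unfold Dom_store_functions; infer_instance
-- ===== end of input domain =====

-- B replaces A's single interleaved break-loop by truncate-then-two-filter-passes; objective: alternative decomposition.

-- ===== PORT A =====
def is_function_line (ln : String) : Bool :=
  PySem.Str.startswith ln "\t" && PySem.Str.endswith ln ";\n" && !(PySem.Str.isIn ":" ln)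

def is_version_end_line (ln : String) : Bool :=
  PySem.Str.startswith ln "}" && PySem.Str.endswith ln ";\n" && !(PySem.Str.isIn ":" ln)

def is_local_line (ln : String) : Bool :=
  PySem.Str.startswith ln "\tlocal: " && PySem.Str.endswith ln ";\n"

-- A's for-loop with break, carried state (functions, local_line)
def storeLoop : List String → List String → List String → List String × List String
  | [], functions, local_line => (functions, local_line)
  | ln :: rest, functions, local_line =>
    if is_version_end_line ln then (functions, local_line)
    else if is_local_line ln then storeLoop rest functions [ln]
    else if is_function_line ln then storeLoop rest (functions ++ [ln]) local_line
    else storeLoop rest functions local_line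

def store_functions (f_in : List String) : List String × List String :=
  storeLoop f_in [] []

-- ===== PORT B =====
-- the prefix of lines before the first version-end line (B's _prefix_before_version_end)
def prefixBeforeVersionEnd : List String → List String
  | [] => []
  | ln :: rest =>
    if is_version_end_line ln then [] else ln :: prefixBeforeVersionEnd rest

def store_functions_alt (f_in : List String) : List String × List String :=
  let pre := prefixBeforeVersionEnd f_in
  let functions := pre.filter is_function_line
  let locs := pre.filter is_local_line
  (functions,
    match PySem.List.pyGet? locs (-1) with   -- [locals_[-1]] if locals_ else []
    | some x => [x]
    | none => [])

-- ===== PRECONDITION & SPEC =====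
def Spec_store_functions (f_in : List String) (out : List String × List String) : Prop := out = store_functions_alt f_in
instance (f_in : List String) (out : List String × List String) : Decidable (Spec_store_functions f_in out) := by unfold Spec_store_functions; infer_instance

-- ===== CLAIM (what is proved, stated in full; the proofs are below) =====
def Claim_equal_store_functions : Prop := ∀ (f_in : List String), Dom_store_functions f_in → Spec_store_functions f_in (store_functions f_in)

-- ===== LEMMAS AND PROOFS =====

-- a local line contains ':', hence is never a function line
lemma loc_not_fn (ln : String) (h : is_local_line ln = true) : is_function_line ln = false := by
  unfold is_local_line at h
  simp only [Bool.and_eq_true] at h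
  unfold is_function_line
  simp only [Bool.and_eq_false_iff, Bool.not_eq_false']
  right
  rw [PySem.Str.isIn_iff_infix]
  have hpre : ("\tlocal: ").toList <+: ln.toList := by
    have := h.1
    rw [PySem.Str.startswith_eq] at this
    exact (PySem.Chars.startswith_iff _ _).mp this
  have hin : (":").toList <:+: ("\tlocal: ").toList := by decide
  exact hin.trans hpre.isInfix

-- last-local selector: the final value of A's local_line given the filtered locals and the incoming state
def lastLoc (locs : List String) (loc : List String) : List String :=
  match locs.getLast? with
  | some x => [x]
  | none => loc

lemma lastLoc_cons (ln : String) (t : List String) (loc : List String) :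
    lastLoc (ln :: t) loc = lastLoc t [ln] := by
  cases t using List.reverseRecOn with
  | nil => simp [lastLoc]
  | append_singleton ys y =>
    have h1 : (ln :: (ys ++ [y])).getLast? = some y := by
      rw [← List.cons_append, List.getLast?_concat]
    simp [lastLoc, h1, List.getLast?_concat]

-- loop invariant: A's loop equals "filter the prefix twice" relative to the carried state
lemma storeLoop_eq (l : List String) (fns loc : List String) :
    storeLoop l fns loc =
      (fns ++ (prefixBeforeVersionEnd l).filter is_function_line,
       lastLoc ((prefixBeforeVersionEnd l).filter is_local_line) loc) := by
  induction l generalizing fns loc with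
  | nil => simp [storeLoop, prefixBeforeVersionEnd, lastLoc]
  | cons ln rest ih =>
    by_cases h1 : is_version_end_line ln = true
    · simp [storeLoop, prefixBeforeVersionEnd, h1, lastLoc]
    · by_cases h2 : is_local_line ln = true
      · have h3 := loc_not_fn ln h2
        simp [storeLoop, prefixBeforeVersionEnd, h1, h2, h3, ih, lastLoc_cons]
      · by_cases h3 : is_function_line ln = true
        · simp [storeLoop, prefixBeforeVersionEnd, h1, h2, h3, ih]
        · simp [storeLoop, prefixBeforeVersionEnd, h1, h2, h3, ih]

-- ===== VERDICT (by name: the statement is the Claim_ definition above) =====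
theorem store_functions_spec : Claim_equal_store_functions := by
  intro f_in _
  show store_functions f_in = store_functions_alt f_in
  rw [store_functions, storeLoop_eq]
  simp only [store_functions_alt, PySem.List.pyGet?_neg_one, List.nil_append, lastLoc]
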